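-- pv_equiv track=rewrite | github.com/kmrnnwr11-jpg/patente-b-c-ce- | scripts/estrai_quiz_cqc.py | dividi_per_parte
-- ===== SOURCE A (Python) =====
-- from typing import List, Dict, Optional
--
-- def dividi_per_parte(quiz_list: List[Dict]) -> Dict[str, List[Dict]]:
--     """Divide i quiz per parte (comune, merci, persone)"""
--
--     parti = {
--         "comune": [],
--         "specifica_merci": [],
--         "specifica_persone": []
--     }
--
--     for quiz in quiz_list:
--         parte = quiz.get("parte", "comune")
--         if parte in parti:
--             parti[parte].append(quiz)
--
--     return parti
-- ===== SOURCE B (Python) =====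
-- from typing import List, Dict, Optional
--
-- def dividi_per_parte(quiz_list: List[Dict]) -> Dict[str, List[Dict]]:
--     """Divide i quiz per parte (comune, merci, persone)"""
--     return {
--         key: [quiz for quiz in quiz_list if quiz.get("parte", "comune") == key]
--         for key in ("comune", "specifica_merci", "specifica_persone")
--     }
-- ===== Notes on version B (the rewrite author's own statement) =====
-- stated objective: idiomatic
-- what changed: Replaces the single multiplexing loop with mutable bucket lists by a dict comprehension of three independent filtering passes, one per fixed bucket key.
import Mathlib
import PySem

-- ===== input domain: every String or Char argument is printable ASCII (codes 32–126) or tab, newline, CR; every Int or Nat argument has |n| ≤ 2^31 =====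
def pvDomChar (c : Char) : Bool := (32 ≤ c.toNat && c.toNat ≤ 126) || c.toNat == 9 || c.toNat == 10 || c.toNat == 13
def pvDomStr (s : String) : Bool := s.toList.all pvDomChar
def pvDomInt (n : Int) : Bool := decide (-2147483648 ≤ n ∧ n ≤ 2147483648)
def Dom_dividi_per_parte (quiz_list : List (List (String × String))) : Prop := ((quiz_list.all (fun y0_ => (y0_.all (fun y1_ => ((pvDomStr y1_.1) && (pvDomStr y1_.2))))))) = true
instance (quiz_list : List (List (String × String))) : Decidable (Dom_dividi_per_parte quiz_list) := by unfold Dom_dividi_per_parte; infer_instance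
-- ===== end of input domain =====

-- B replaces A's single multiplexing loop (mutable dict of buckets) by three independent
-- filtering passes, one per fixed key (objective: idiomatic). Equivalence of return values proved below.

-- ===== PORT A =====
def dividi_per_parte (quiz_list : List (List (String × String))) : List (String × List (List (String × String))) :=
  let parti : PySem.Dict String (List (List (String × String))) :=
    ((PySem.Dict.empty.insert "comune" []).insert "specifica_merci" []).insert "specifica_persone" []
  (quiz_list.foldl (fun parti quiz =>
      let parte := (PySem.Dict.mk quiz).getD "parte" "comune"
      if parti.contains parte then parti.modify parte [] (fun l => l ++ [quiz]) else parti)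
    parti).items

-- ===== PORT B =====
def dividi_per_parte_alt (quiz_list : List (List (String × String))) : List (String × List (List (String × String))) :=
  ["comune", "specifica_merci", "specifica_persone"].map (fun key =>
    (key, quiz_list.filter (fun quiz => (PySem.Dict.mk quiz).getD "parte" "comune" == key)))

-- ===== PRECONDITION & SPEC =====
def Spec_dividi_per_parte (quiz_list : List (List (String × String))) (out : List (String × List (List (String × String)))) : Prop := out = dividi_per_parte_alt quiz_list
instance (quiz_list : List (List (String × String))) (out : List (String × List (List (String × String)))) : Decidable (Spec_dividi_per_parte quiz_list out) := by unfold Spec_dividi_per_parte; infer_instance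

-- ===== CLAIM (what is proved, stated in full; the proofs are below) =====
def Claim_equal_dividi_per_parte : Prop := ∀ (quiz_list : List (List (String × String))), Dom_dividi_per_parte quiz_list → Spec_dividi_per_parte quiz_list (dividi_per_parte quiz_list)

-- ===== LEMMAS AND PROOFS =====

-- the three-bucket dict that A's loop maintains
def pvDict3 (a b c : List (List (String × String))) : PySem.Dict String (List (List (String × String))) :=
  PySem.Dict.mk [("comune", a), ("specifica_merci", b), ("specifica_persone", c)]

def pvStep (parti : PySem.Dict String (List (List (String × String)))) (quiz : List (String × String)) :
    PySem.Dict String (List (List (String × String))) :=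
  let parte := (PySem.Dict.mk quiz).getD "parte" "comune"
  if parti.contains parte then parti.modify parte [] (fun l => l ++ [quiz]) else parti

lemma pvStep_dict3 (a b c : List (List (String × String))) (quiz : List (String × String)) :
    pvStep (pvDict3 a b c) quiz =
      pvDict3 (a ++ if (PySem.Dict.mk quiz).getD "parte" "comune" == "comune" then [quiz] else [])
              (b ++ if (PySem.Dict.mk quiz).getD "parte" "comune" == "specifica_merci" then [quiz] else [])
              (c ++ if (PySem.Dict.mk quiz).getD "parte" "comune" == "specifica_persone" then [quiz] else []) := by
  unfold pvStep
  generalize (PySem.Dict.mk quiz).getD "parte" "comune" = p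
  by_cases h1 : p = "comune"
  · subst h1
    simp [pvDict3, PySem.Dict.contains, PySem.Dict.modify, PySem.Dict.insert, PySem.Dict.getD, PySem.Dict.get?]
  · by_cases h2 : p = "specifica_merci"
    · subst h2
      simp [pvDict3, PySem.Dict.contains, PySem.Dict.modify, PySem.Dict.insert, PySem.Dict.getD, PySem.Dict.get?]
    · by_cases h3 : p = "specifica_persone"
      · subst h3
        simp [pvDict3, PySem.Dict.contains, PySem.Dict.modify, PySem.Dict.insert, PySem.Dict.getD, PySem.Dict.get?]
      · simp [pvDict3, PySem.Dict.contains, h1, h2, h3, Ne.symm h1, Ne.symm h2, Ne.symm h3]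

lemma pvFold_dict3 (l : List (List (String × String))) (a b c : List (List (String × String))) :
    l.foldl pvStep (pvDict3 a b c) =
      pvDict3 (a ++ l.filter (fun q => (PySem.Dict.mk q).getD "parte" "comune" == "comune"))
              (b ++ l.filter (fun q => (PySem.Dict.mk q).getD "parte" "comune" == "specifica_merci"))
              (c ++ l.filter (fun q => (PySem.Dict.mk q).getD "parte" "comune" == "specifica_persone")) := by
  induction l generalizing a b c with
  | nil => simp
  | cons q l ih =>
      simp only [List.foldl_cons, pvStep_dict3, ih, List.filter_cons]
      by_cases h1 : ((PySem.Dict.mk q).getD "parte" "comune" == "comune") = true <;>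
        by_cases h2 : ((PySem.Dict.mk q).getD "parte" "comune" == "specifica_merci") = true <;>
        by_cases h3 : ((PySem.Dict.mk q).getD "parte" "comune" == "specifica_persone") = true <;>
        simp_all

-- ===== VERDICT (by name: the statement is the Claim_ definition above) =====
theorem dividi_per_parte_spec : Claim_equal_dividi_per_parte := by
  intro quiz_list _
  show dividi_per_parte quiz_list = dividi_per_parte_alt quiz_list
  have : dividi_per_parte quiz_list = (quiz_list.foldl pvStep (pvDict3 [] [] [])).items := rfl
  rw [this, pvFold_dict3]
  simp [pvDict3, dividi_per_parte_alt]
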